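-- pv_equiv track=rewrite | github.com/Jiahuiche/SBC-MENU | ConstruirJSON.py | determine_dish_class
-- ===== SOURCE A (Python) =====
-- STARTER_TERMS = {
--     'starter', 'appetizer', 'antipasti', 'antipasto', 'snack', 'fingerfood',
--     'side dish', 'side-dish', 'salad', 'soup', 'breakfast', 'brunch', 'morning meal'
-- }
--
-- MAIN_TERMS = {
--     'main course', 'main-course', 'main dish', 'main-dish', 'main', 'dinner', 'lunch'
-- }
--
-- DESSERT_TERMS = {'dessert', 'treat'}
--
-- DISH_CLASS_BY_FILTER = {
--     'main course': 'Main',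
--     'main': 'Main',
--     'appetizer': 'Starter',
--     'side dish': 'Starter',
--     'dessert': 'Dessert'
-- }
--
-- def determine_dish_class(meal_type_filter, dish_types):
--     """Resolve recipe dish class using API dish types and requested meal type."""
--     base_class = DISH_CLASS_BY_FILTER.get(meal_type_filter, 'Mixed')
--     if not dish_types:
--         return base_class
--
--     normalized = {term.strip().lower() for term in dish_types if term}
--
--     if normalized & DESSERT_TERMS:
--         return 'Dessert'
--     if normalized & MAIN_TERMS:
--         return 'Main'
--     if normalized & STARTER_TERMS:
--         return 'Starter'
--
--     return base_class
-- ===== SOURCE B (Python) =====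
-- # One indexed pass: a merged term->rank table replaces the three set-intersection scans.
-- DISH_TERM_RANK = {
--     'dessert': 3, 'treat': 3,
--     'main course': 2, 'main-course': 2, 'main dish': 2, 'main-dish': 2,
--     'main': 2, 'dinner': 2, 'lunch': 2,
--     'starter': 1, 'appetizer': 1, 'antipasti': 1, 'antipasto': 1, 'snack': 1,
--     'fingerfood': 1, 'side dish': 1, 'side-dish': 1, 'salad': 1, 'soup': 1,
--     'breakfast': 1, 'brunch': 1, 'morning meal': 1,
-- }
--
-- BASE_CLASS = {
--     'main course': 'Main',
--     'main': 'Main',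
--     'appetizer': 'Starter',
--     'side dish': 'Starter',
--     'dessert': 'Dessert'
-- }
--
-- def determine_dish_class(meal_type_filter, dish_types):
--     best = 0
--     for term in dish_types:
--         if term:
--             best = max(best, DISH_TERM_RANK.get(term.strip().lower(), 0))
--     if best == 3:
--         return 'Dessert'
--     if best == 2:
--         return 'Main'
--     if best == 1:
--         return 'Starter'
--     return BASE_CLASS.get(meal_type_filter, 'Mixed')
-- ===== Notes on version B (the rewrite author's own statement) =====
-- stated objective: alternative
-- what changed: B replaces A's build-a-set-then-three-set-intersection tests with a single pass over dish_types that looks each normalized term up in one merged term-to-rank table and keeps the maximum rank (Dessert=3 > Main=2 > Starter=1), resolving the class from that rank.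
import Mathlib
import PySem

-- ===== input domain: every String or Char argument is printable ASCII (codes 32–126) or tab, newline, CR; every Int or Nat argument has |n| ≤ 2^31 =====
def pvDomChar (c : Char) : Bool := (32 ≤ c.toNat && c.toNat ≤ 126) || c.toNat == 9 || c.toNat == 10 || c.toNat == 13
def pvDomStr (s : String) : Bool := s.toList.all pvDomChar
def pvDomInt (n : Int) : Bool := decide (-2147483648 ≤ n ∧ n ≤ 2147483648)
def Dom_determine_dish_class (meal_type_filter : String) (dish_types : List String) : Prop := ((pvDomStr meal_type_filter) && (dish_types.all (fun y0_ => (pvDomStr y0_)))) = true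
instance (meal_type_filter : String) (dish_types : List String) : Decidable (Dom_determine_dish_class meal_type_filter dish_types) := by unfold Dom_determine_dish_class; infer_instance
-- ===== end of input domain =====

-- B does one pass over dish_types with a merged term→rank table instead of A's set building plus three set-intersection tests; objective: alternative (same cost class, different algorithm).

-- ===== PORT A =====
def STARTER_TERMS : PySem.Set String := PySem.Set.ofList
  ["starter", "appetizer", "antipasti", "antipasto", "snack", "fingerfood",
   "side dish", "side-dish", "salad", "soup", "breakfast", "brunch", "morning meal"]

def MAIN_TERMS : PySem.Set String := PySem.Set.ofList
  ["main course", "main-course", "main dish", "main-dish", "main", "dinner", "lunch"]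

def DESSERT_TERMS : PySem.Set String := PySem.Set.ofList ["dessert", "treat"]

def DISH_CLASS_BY_FILTER : PySem.Dict String String := PySem.Dict.ofList
  [("main course", "Main"), ("main", "Main"), ("appetizer", "Starter"),
   ("side dish", "Starter"), ("dessert", "Dessert")]

def determine_dish_class (meal_type_filter : String) (dish_types : List String) : String :=
  let base_class := DISH_CLASS_BY_FILTER.getD meal_type_filter "Mixed"
  if dish_types.isEmpty then base_class
  else
    -- {term.strip().lower() for term in dish_types if term}
    let normalized : PySem.Set String :=
      PySem.Set.ofList ((dish_types.filter (fun t => !(t == ""))).map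
        (fun t => PySem.Str.lower (PySem.Str.strip t)))
    if !(PySem.Set.inter normalized DESSERT_TERMS).isEmpty then "Dessert"
    else if !(PySem.Set.inter normalized MAIN_TERMS).isEmpty then "Main"
    else if !(PySem.Set.inter normalized STARTER_TERMS).isEmpty then "Starter"
    else base_class

-- ===== PORT B =====
def DISH_TERM_RANK : PySem.Dict String Int := PySem.Dict.ofList
  [("dessert", 3), ("treat", 3),
   ("main course", 2), ("main-course", 2), ("main dish", 2), ("main-dish", 2),
   ("main", 2), ("dinner", 2), ("lunch", 2),
   ("starter", 1), ("appetizer", 1), ("antipasti", 1), ("antipasto", 1), ("snack", 1),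
   ("fingerfood", 1), ("side dish", 1), ("side-dish", 1), ("salad", 1), ("soup", 1),
   ("breakfast", 1), ("brunch", 1), ("morning meal", 1)]

def BASE_CLASS : PySem.Dict String String := PySem.Dict.ofList
  [("main course", "Main"), ("main", "Main"), ("appetizer", "Starter"),
   ("side dish", "Starter"), ("dessert", "Dessert")]

def determine_dish_class_alt (meal_type_filter : String) (dish_types : List String) : String :=
  let best : Int := dish_types.foldl
    (fun b t =>
      if !(t == "") then
        max b (DISH_TERM_RANK.getD (PySem.Str.lower (PySem.Str.strip t)) 0)
      else b) 0
  if best == 3 then "Dessert"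
  else if best == 2 then "Main"
  else if best == 1 then "Starter"
  else BASE_CLASS.getD meal_type_filter "Mixed"

-- ===== PRECONDITION & SPEC =====
def Spec_determine_dish_class (meal_type_filter : String) (dish_types : List String) (out : String) : Prop := out = determine_dish_class_alt meal_type_filter dish_types
instance (meal_type_filter : String) (dish_types : List String) (out : String) : Decidable (Spec_determine_dish_class meal_type_filter dish_types out) := by unfold Spec_determine_dish_class; infer_instance

-- ===== CLAIM (what is proved, stated in full; the proofs are below) =====
def Claim_equal_determine_dish_class : Prop := ∀ (meal_type_filter : String) (dish_types : List String), Dom_determine_dish_class meal_type_filter dish_types → Spec_determine_dish_class meal_type_filter dish_types (determine_dish_class meal_type_filter dish_types)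

-- ===== LEMMAS AND PROOFS =====

-- proof-side abbreviations: the shared normalization, and B's rank of a raw term
def pvNorm (t : String) : String := PySem.Str.lower (PySem.Str.strip t)
def pvRank (t : String) : Int := DISH_TERM_RANK.getD (pvNorm t) 0

-- the merged rank table agrees with A's three term sets, with the Dessert>Main>Starter priority
set_option maxHeartbeats 1000000 in
lemma pvRank_spec (t : String) : pvRank t =
    (if pvNorm t ∈ DESSERT_TERMS then 3
     else if pvNorm t ∈ MAIN_TERMS then 2
     else if pvNorm t ∈ STARTER_TERMS then 1
     else 0) := by
  unfold pvRank
  generalize pvNorm t = s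
  by_cases h0 : s = "dessert"
  · subst h0; decide
  by_cases h1 : s = "treat"
  · subst h1; decide
  by_cases h2 : s = "main course"
  · subst h2; decide
  by_cases h3 : s = "main-course"
  · subst h3; decide
  by_cases h4 : s = "main dish"
  · subst h4; decide
  by_cases h5 : s = "main-dish"
  · subst h5; decide
  by_cases h6 : s = "main"
  · subst h6; decide
  by_cases h7 : s = "dinner"
  · subst h7; decide
  by_cases h8 : s = "lunch"
  · subst h8; decide
  by_cases h9 : s = "starter"
  · subst h9; decide
  by_cases h10 : s = "appetizer"
  · subst h10; decide
  by_cases h11 : s = "antipasti"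
  · subst h11; decide
  by_cases h12 : s = "antipasto"
  · subst h12; decide
  by_cases h13 : s = "snack"
  · subst h13; decide
  by_cases h14 : s = "fingerfood"
  · subst h14; decide
  by_cases h15 : s = "side dish"
  · subst h15; decide
  by_cases h16 : s = "side-dish"
  · subst h16; decide
  by_cases h17 : s = "salad"
  · subst h17; decide
  by_cases h18 : s = "soup"
  · subst h18; decide
  by_cases h19 : s = "breakfast"
  · subst h19; decide
  by_cases h20 : s = "brunch"
  · subst h20; decide
  by_cases h21 : s = "morning meal"
  · subst h21; decide
  simp only [DISH_TERM_RANK, DESSERT_TERMS, MAIN_TERMS, STARTER_TERMS, PySem.Set.ofList,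
    PySem.Dict.ofList, PySem.Dict.update, List.foldl_cons, List.foldl_nil,
    PySem.Dict.getD_insert, PySem.Dict.getD_empty,
    h0, h1, h2, h3, h4, h5, h6, h7, h8, h9, h10, h11, h12, h13, h14, h15, h16, h17, h18, h19,
    h20, h21, if_false]
  simp [h0, h1, h2, h3, h4, h5, h6, h7, h8, h9, h10, h11, h12, h13, h14,
    h15, h16, h17, h18, h19, h20, h21]

lemma pvRank_le_three (t : String) : pvRank t ≤ 3 := by
  rw [pvRank_spec]; split_ifs <;> norm_num

lemma pvRank_three_iff (t : String) : 3 ≤ pvRank t ↔ pvNorm t ∈ DESSERT_TERMS := by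
  rw [pvRank_spec]; split_ifs <;> simp_all

lemma pvRank_two_iff (t : String) :
    2 ≤ pvRank t ↔ (pvNorm t ∈ DESSERT_TERMS ∨ pvNorm t ∈ MAIN_TERMS) := by
  rw [pvRank_spec]; split_ifs <;> simp_all

lemma pvRank_one_iff (t : String) :
    1 ≤ pvRank t ↔ (pvNorm t ∈ DESSERT_TERMS ∨ pvNorm t ∈ MAIN_TERMS ∨ pvNorm t ∈ STARTER_TERMS) := by
  rw [pvRank_spec]; split_ifs <;> simp_all

-- B's running maximum, accumulator pulled out
def pvM (ds : List String) : Int :=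
  ds.foldr (fun t b => if !(t == "") then max (pvRank t) b else b) 0

lemma pvM_cons (t : String) (ds : List String) :
    pvM (t :: ds) = if t = "" then pvM ds else max (pvRank t) (pvM ds) := by
  by_cases h : t = "" <;> simp [pvM, h]

lemma pvFold_eq (ds : List String) (a : Int) (ha : 0 ≤ a) :
    ds.foldl (fun b t => if !(t == "") then max b (DISH_TERM_RANK.getD (PySem.Str.lower (PySem.Str.strip t)) 0) else b) a
      = max a (pvM ds) := by
  induction ds generalizing a with
  | nil => simp [pvM, max_eq_left ha]
  | cons t ds ih =>
      by_cases h : t = ""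
      · subst h
        rw [pvM_cons, if_pos rfl]
        simpa using ih a ha
      · simp only [List.foldl_cons, pvM_cons, if_neg h]
        rw [show ((!(t == "")) = true) from by simp [h], if_pos rfl,
          ih _ (le_trans ha (le_max_left _ _))]
        show max (max a (pvRank t)) (pvM ds) = max a (max (pvRank t) (pvM ds))
        rw [max_assoc]

lemma pvM_nonneg (ds : List String) : 0 ≤ pvM ds := by
  induction ds with
  | nil => simp [pvM]
  | cons t ds ih => rw [pvM_cons]; split <;> [exact ih; exact le_trans ih (le_max_right _ _)]

lemma pvM_le_three (ds : List String) : pvM ds ≤ 3 := by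
  induction ds with
  | nil => simp [pvM]
  | cons t ds ih =>
      rw [pvM_cons]; split <;> [exact ih; exact max_le (pvRank_le_three t) ih]

lemma pvLe_M_iff (ds : List String) (k : Int) (hk : 0 < k) :
    k ≤ pvM ds ↔ ∃ t ∈ ds, t ≠ "" ∧ k ≤ pvRank t := by
  induction ds with
  | nil => simp [pvM]; omega
  | cons t ds ih =>
      rw [pvM_cons]
      by_cases h : t = ""
      · rw [if_pos h, ih]
        constructor
        · rintro ⟨u, hu, hne, hr⟩; exact ⟨u, List.mem_cons_of_mem _ hu, hne, hr⟩
        · rintro ⟨u, hu, hne, hr⟩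
          rcases List.mem_cons.mp hu with rfl | hu
          · exact absurd h hne
          · exact ⟨u, hu, hne, hr⟩
      · rw [if_neg h, le_max_iff, ih]
        constructor
        · rintro (h1 | ⟨u, hu, hne, hr⟩)
          · exact ⟨t, List.mem_cons_self, h, h1⟩
          · exact ⟨u, List.mem_cons_of_mem _ hu, hne, hr⟩
        · rintro ⟨u, hu, hne, hr⟩
          rcases List.mem_cons.mp hu with rfl | hu
          · exact Or.inl hr
          · exact Or.inr ⟨u, hu, hne, hr⟩

-- A's "normalized & S is nonempty" test, as an existential over the raw list
lemma pvInter_test (ds : List String) (S : PySem.Set String) :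
    (!(PySem.Set.inter (PySem.Set.ofList ((ds.filter (fun t => !(t == ""))).map
        (fun t => PySem.Str.lower (PySem.Str.strip t)))) S).isEmpty) = true
      ↔ ∃ t ∈ ds, t ≠ "" ∧ pvNorm t ∈ S := by
  simp only [PySem.Set.inter, PySem.Set.contains_eq_listContains, List.contains_eq_mem,
    Bool.not_eq_eq_eq_not, Bool.not_true, List.isEmpty_eq_false_iff, ne_eq,
    List.eq_nil_iff_forall_not_mem, List.mem_filter, PySem.Set.mem_ofList, decide_eq_true_eq,
    not_and, not_forall, Decidable.not_not, List.mem_map, pvNorm,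
    Bool.not_eq_eq_eq_not, beq_eq_false_iff_ne]
  constructor
  · rintro ⟨x, ⟨⟨t, ⟨ht, hne⟩, rfl⟩, hS⟩⟩; exact ⟨t, ht, hne, hS⟩
  · rintro ⟨t, ht, hne, hS⟩; exact ⟨_, ⟨⟨t, ⟨ht, hne⟩, rfl⟩, hS⟩⟩

-- ===== VERDICT (by name: the statement is the Claim_ definition above) =====
theorem determine_dish_class_spec : Claim_equal_determine_dish_class := by
  intro m ds _
  show determine_dish_class m ds = determine_dish_class_alt m ds
  have hbound₀ := pvM_nonneg ds
  have hbound₃ := pvM_le_three ds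
  have hD : 3 ≤ pvM ds ↔ (∃ t ∈ ds, t ≠ "" ∧ pvNorm t ∈ DESSERT_TERMS) := by
    rw [pvLe_M_iff ds 3 (by norm_num)]
    exact exists_congr fun t => and_congr_right fun _ => and_congr_right fun _ => pvRank_three_iff t
  have hM : 2 ≤ pvM ds ↔
      ((∃ t ∈ ds, t ≠ "" ∧ pvNorm t ∈ DESSERT_TERMS) ∨ (∃ t ∈ ds, t ≠ "" ∧ pvNorm t ∈ MAIN_TERMS)) := by
    rw [pvLe_M_iff ds 2 (by norm_num)]
    constructor
    · rintro ⟨t, ht, hne, hr⟩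
      rcases (pvRank_two_iff t).mp hr with h | h
      · exact Or.inl ⟨t, ht, hne, h⟩
      · exact Or.inr ⟨t, ht, hne, h⟩
    · rintro (⟨t, ht, hne, h⟩ | ⟨t, ht, hne, h⟩)
      · exact ⟨t, ht, hne, (pvRank_two_iff t).mpr (Or.inl h)⟩
      · exact ⟨t, ht, hne, (pvRank_two_iff t).mpr (Or.inr h)⟩
  have hS : 1 ≤ pvM ds ↔
      ((∃ t ∈ ds, t ≠ "" ∧ pvNorm t ∈ DESSERT_TERMS) ∨ (∃ t ∈ ds, t ≠ "" ∧ pvNorm t ∈ MAIN_TERMS)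
        ∨ (∃ t ∈ ds, t ≠ "" ∧ pvNorm t ∈ STARTER_TERMS)) := by
    rw [pvLe_M_iff ds 1 (by norm_num)]
    constructor
    · rintro ⟨t, ht, hne, hr⟩
      rcases (pvRank_one_iff t).mp hr with h | h | h
      · exact Or.inl ⟨t, ht, hne, h⟩
      · exact Or.inr (Or.inl ⟨t, ht, hne, h⟩)
      · exact Or.inr (Or.inr ⟨t, ht, hne, h⟩)
    · rintro (⟨t, ht, hne, h⟩ | ⟨t, ht, hne, h⟩ | ⟨t, ht, hne, h⟩)
      · exact ⟨t, ht, hne, (pvRank_one_iff t).mpr (Or.inl h)⟩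
      · exact ⟨t, ht, hne, (pvRank_one_iff t).mpr (Or.inr (Or.inl h))⟩
      · exact ⟨t, ht, hne, (pvRank_one_iff t).mpr (Or.inr (Or.inr h))⟩
  simp only [determine_dish_class, determine_dish_class_alt,
    pvFold_eq ds 0 (le_refl 0), max_eq_right hbound₀]
  by_cases hnil : ds = []
  · subst hnil
    simp only [List.isEmpty_nil, pvM, List.foldr_nil]
    norm_num
    rfl
  · rw [if_neg (by simp [hnil])]
    have hd' := pvInter_test ds DESSERT_TERMS
    have hm' := pvInter_test ds MAIN_TERMS
    have hs' := pvInter_test ds STARTER_TERMS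
    by_cases hcd : ∃ t ∈ ds, t ≠ "" ∧ pvNorm t ∈ DESSERT_TERMS
    · have h3 : pvM ds = 3 := le_antisymm hbound₃ (hD.mpr hcd)
      rw [if_pos (hd'.mpr hcd), h3]
      norm_num
    · have hA1 : ¬ _ := fun h => hcd (hd'.mp h)
      rw [if_neg hA1]
      by_cases hcm : ∃ t ∈ ds, t ≠ "" ∧ pvNorm t ∈ MAIN_TERMS
      · have h2 : 2 ≤ pvM ds := hM.mpr (Or.inr hcm)
        have h3 : ¬ 3 ≤ pvM ds := fun h => hcd (hD.mp h)
        have he : pvM ds = 2 := by omega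
        rw [if_pos (hm'.mpr hcm), he]
        norm_num
      · have hA2 : ¬ _ := fun h => hcm (hm'.mp h)
        rw [if_neg hA2]
        by_cases hcs : ∃ t ∈ ds, t ≠ "" ∧ pvNorm t ∈ STARTER_TERMS
        · have h1 : 1 ≤ pvM ds := hS.mpr (Or.inr (Or.inr hcs))
          have h2 : ¬ 2 ≤ pvM ds := fun h => (hM.mp h).elim hcd hcm
          have he : pvM ds = 1 := by omega
          rw [if_pos (hs'.mpr hcs), he]
          norm_num
        · have hA3 : ¬ _ := fun h => hcs (hs'.mp h)
          have h1 : ¬ 1 ≤ pvM ds := fun h => (hS.mp h).elim hcd (fun h' => h'.elim hcm hcs)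
          have he : pvM ds = 0 := by omega
          rw [if_neg hA3, he]
          norm_num
          rfl
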